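-- pv_equiv track=rewrite | github.com/aiaod1009/python-lanqiao | 省一题库/综合题/质数补全.py | dfs
-- ===== SOURCE A (Python) =====
-- import math
--
-- def p(x):
--     if x < 2:
--         return False
--     for i in range(2,int(math.isqrt(x))+1):
--         if x % i == 0:
--             return False
--     return True
--
-- def dfs(i,num,s):
--     if i == len(s):
--         return num if p(num) else -1
--     if s[i] != '*':
--         return dfs(i+1,num*10+int(s[i]),s)
--     for d in range(10):
--         res = dfs(i+1,num*10+d,s)
--         if res != -1:
--             return res
--     return -1
-- ===== SOURCE B (Python) =====
-- import math
--
-- def p(x):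
--     if x < 2:
--         return False
--     for i in range(2,int(math.isqrt(x))+1):
--         if x % i == 0:
--             return False
--     return True
--
-- def dfs(i, num, s):
--     # two-phase: materialise the visited pattern once, then enumerate the
--     # wildcard fills by a single base-10 counter, testing candidates in order
--     suffix = [s[j] for j in range(i, len(s))]
--     k = suffix.count('*')
--     for t in range(10 ** k):
--         x, j = num, k
--         for c in suffix:
--             if c != '*':
--                 x = x * 10 + int(c)
--             else:
--                 j -= 1
--                 x = x * 10 + (t // 10 ** j) % 10
--         if p(x):
--             return x
--     return -1
-- ===== Notes on version B (the rewrite author's own statement) =====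
-- stated objective: alternative
-- what changed: A's pruned recursive DFS over string indices is replaced by a two-phase scheme: materialise the visited pattern once, then enumerate the wildcard fills with a single base-10 counter, rebuilding and primality-testing each candidate in the same increasing order until the first prime.
import Mathlib
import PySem

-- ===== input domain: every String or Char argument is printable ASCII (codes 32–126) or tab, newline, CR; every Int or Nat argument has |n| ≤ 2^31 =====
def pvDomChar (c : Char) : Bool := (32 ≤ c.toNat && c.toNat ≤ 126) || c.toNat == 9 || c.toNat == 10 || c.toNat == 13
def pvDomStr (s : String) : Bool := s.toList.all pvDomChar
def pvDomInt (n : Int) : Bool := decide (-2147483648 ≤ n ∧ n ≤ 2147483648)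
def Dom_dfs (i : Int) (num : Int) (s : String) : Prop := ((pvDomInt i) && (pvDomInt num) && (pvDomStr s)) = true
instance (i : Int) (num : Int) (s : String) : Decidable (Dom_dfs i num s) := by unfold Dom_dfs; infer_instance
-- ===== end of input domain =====

-- B replaces A's pruned digit-DFS by a two-phase scheme (materialise the visited
-- pattern once, then enumerate wildcard fills with one base-10 counter); objective:
-- alternative decomposition, same candidate order and cost.

-- ===== PORT A =====
-- helper p(x): trial division primality test (shared by both Pythons verbatim)
def pchk (x : Int) : Bool :=
  if x < 2 then false
  else (PySem.List.pyRange 2 ((Nat.sqrt x.toNat : Int) + 1) 1).all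
        (fun j => !(PySem.Int.mod x j == 0))

def dfs (i : Int) (num : Int) (s : String) : Int :=
  if i = PySem.Str.len s then (if pchk num then num else -1)
  else
    match h : PySem.Str.pyGet? s i with
    | none => 0  -- Python raises IndexError here; excluded by Pre_dfs
    | some c =>
      if c ≠ '*' then
        match PySem.Int.ofChars? [c] with
        | none => 0  -- Python raises ValueError (int(s[i])); excluded by Pre_dfs
        | some d => dfs (i+1) (num*10+d) s
      else
        (PySem.List.pyRange 0 10 1).foldl
          (fun res d => if res ≠ -1 then res else dfs (i+1) (num*10+d) s) (-1)
termination_by (PySem.Str.len s - i).toNat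
decreasing_by
  all_goals
    have h' : PySem.List.pyGet? s.toList i = some c := h
    have hn : ¬ PySem.List.pyGet? s.toList i = none := by rw [h']; simp
    rw [PySem.List.pyGet?_eq_none_iff] at hn
    unfold PySem.Raise.InRange at hn
    have hl : PySem.Str.len s = (s.toList.length : Int) := rfl
    rw [hl]
    omega

-- ===== PORT B =====
-- inner loop of Source B: walk the pattern, filling wildcards from counter t
def buildCand (x : Int) (j : Nat) (t : Int) : List Char → Int
  | [] => x
  | c :: rest =>
    if c ≠ '*' then
      buildCand (x*10 + (PySem.Int.ofChars? [c]).getD 0) j t rest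
    else
      buildCand (x*10 + PySem.Int.mod (PySem.Int.floordiv t ((10:Int)^(j-1))) 10) (j-1) t rest

def dfs_alt (i : Int) (num : Int) (s : String) : Int :=
  let suffix := (PySem.List.pyRange i (PySem.Str.len s) 1).map
                  (fun j => (PySem.Str.pyGet? s j).getD ' ')
  let k := suffix.count '*'
  match (PySem.List.pyRange 0 ((10:Int)^k) 1).find?
          (fun t => pchk (buildCand num k t suffix)) with
  | some t => buildCand num k t suffix
  | none => -1

-- ===== PRECONDITION & SPEC =====
-- the characters A's recursion visits from index i (Python's negative indices wrap)
def visChars (i : Int) (s : String) : List Char :=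
  if 0 ≤ i then s.toList.drop i.toNat
  else s.toList.drop (s.toList.length + i).toNat ++ s.toList

-- Pre_ excludes exactly the inputs where the Python A raises: IndexError when i is
-- outside [-len(s), len(s)], ValueError when a visited character is neither '*' nor
-- a digit accepted by int().
def Pre_dfs (i : Int) (num : Int) (s : String) : Prop :=
  -(s.toList.length : Int) ≤ i ∧ i ≤ (s.toList.length : Int) ∧
  ((visChars i s).all (fun c => c == '*' || (48 ≤ c.toNat && c.toNat ≤ 57))) = true

instance (i : Int) (num : Int) (s : String) : Decidable (Pre_dfs i num s) := by
  unfold Pre_dfs; infer_instance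

def pvWitness_dfs : Int × Int × String := (0, 0, "1*")

def Spec_dfs (i : Int) (num : Int) (s : String) (out : Int) : Prop := out = dfs_alt i num s
instance (i : Int) (num : Int) (s : String) (out : Int) : Decidable (Spec_dfs i num s out) := by unfold Spec_dfs; infer_instance

-- ===== CLAIM (what is proved, stated in full; the proofs are below) =====
def Claim_equal_dfs : Prop := ∀ (i : Int) (num : Int) (s : String), Dom_dfs i num s → Pre_dfs i num s → Spec_dfs i num s (dfs i num s)

-- ===== LEMMAS AND PROOFS =====

-- a decimal digit character is accepted by Python's int()
set_option maxRecDepth 4000 in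
lemma digit_isSome (c : Char) (h1 : 48 ≤ c.toNat) (h2 : c.toNat ≤ 57) :
    (PySem.Int.ofChars? [c]).isSome := by
  have h : c.toNat = 48 ∨ c.toNat = 49 ∨ c.toNat = 50 ∨ c.toNat = 51 ∨ c.toNat = 52 ∨
      c.toNat = 53 ∨ c.toNat = 54 ∨ c.toNat = 55 ∨ c.toNat = 56 ∨ c.toNat = 57 := by omega
  have hc := Char.ofNat_toNat c
  rcases h with h|h|h|h|h|h|h|h|h|h <;> (rw [h] at hc; rw [← hc]; decide)

-- proof-side mirror of A's recursion over the visited character list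
def dfsL (num : Int) : List Char → Int
  | [] => if pchk num then num else -1
  | c :: rest =>
    if c ≠ '*' then
      match PySem.Int.ofChars? [c] with
      | none => 0
      | some d => dfsL (num*10+d) rest
    else
      (PySem.List.pyRange 0 10 1).foldl
        (fun res d => if res ≠ -1 then res else dfsL (num*10+d) rest) (-1)

-- proof-side candidate list in DFS order
def cand (num : Int) : List Char → List Int
  | [] => [num]
  | c :: rest =>
    if c ≠ '*' then cand (num*10 + (PySem.Int.ofChars? [c]).getD 0) rest
    else (PySem.List.pyRange 0 10 1).flatMap (fun d => cand (num*10+d) rest)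

def firstP (l : List Int) : Int :=
  match l.find? pchk with
  | some x => x
  | none => -1

lemma pchk_ge_two {x : Int} (h : pchk x = true) : 2 ≤ x := by
  unfold pchk at h
  by_cases hx : x < 2
  · simp [hx] at h
  · omega

lemma visChars_cons {i : Int} {s : String}
    (h1 : -(s.toList.length : Int) ≤ i) (h2 : i < (s.toList.length : Int)) :
    ∃ c, PySem.Str.pyGet? s i = some c ∧ visChars i s = c :: visChars (i+1) s := by
  by_cases h0 : 0 ≤ i
  · have hlt : i.toNat < s.toList.length := by omega
    refine ⟨s.toList[i.toNat], PySem.List.pyGet?_eq_some_getElem s.toList h0 (by omega), ?_⟩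
    unfold visChars
    rw [if_pos h0, if_pos (by omega : (0:Int) ≤ i + 1)]
    rw [List.drop_eq_getElem_cons hlt]
    congr 2
    omega
  · have hm : (s.toList.length + i).toNat < s.toList.length := by omega
    refine ⟨s.toList[(s.toList.length + i).toNat], ?_, ?_⟩
    · rw [← List.getElem?_eq_getElem hm]
      have hk : i = -(((-i).toNat : Nat) : Int) := by omega
      rw [show PySem.Str.pyGet? s i = PySem.List.pyGet? s.toList i from rfl, hk,
        PySem.List.pyGet?_neg_natCast s.toList (-i).toNat (by omega) (by omega)]
      congr 2
      omega
    · by_cases h0' : 0 ≤ i + 1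
      · have hi : i = -1 := by omega
        subst hi
        unfold visChars
        rw [if_neg h0, if_pos h0']
        rw [List.drop_eq_getElem_cons hm, List.cons_append]
        congr 1
        rw [show ((s.toList.length:Int) + (-1:Int)).toNat + 1 = s.toList.length by omega]
        simp
      · unfold visChars
        rw [if_neg h0, if_neg h0']
        rw [show ((s.toList.length:Int) + (i+1)).toNat = ((s.toList.length:Int) + i).toNat + 1 by omega]
        rw [List.drop_eq_getElem_cons hm, List.cons_append]


lemma visChars_len (s : String) : visChars ((s.toList.length : Int)) s = [] := by
  simp [visChars]

-- Stage 1: A's port equals the list-level recursion on the visited characters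
lemma dfs_eq_dfsL (s : String) : ∀ (n : Nat) (i num : Int), (s.toList.length : Int) - i ≤ (n:Int) →
    -(s.toList.length : Int) ≤ i → i ≤ (s.toList.length : Int) →
    dfs i num s = dfsL num (visChars i s) := by
  intro n
  induction n with
  | zero =>
    intro i num hb h1 h2
    have hi : i = (s.toList.length : Int) := by omega
    subst hi
    rw [dfs, show PySem.Str.len s = (s.toList.length : Int) from rfl, if_pos rfl, visChars_len]
    rfl
  | succ n ih =>
    intro i num hb h1 h2
    by_cases hi : i = (s.toList.length : Int)
    · subst hi
      rw [dfs, show PySem.Str.len s = (s.toList.length : Int) from rfl, if_pos rfl, visChars_len]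
      rfl
    · have hlt : i < (s.toList.length : Int) := by omega
      obtain ⟨c, hget, hcons⟩ := visChars_cons h1 hlt
      rw [dfs, show PySem.Str.len s = (s.toList.length : Int) from rfl, if_neg hi, hcons, dfsL]
      split
      case _ heq => rw [hget] at heq; cases heq
      case _ c1 heq =>
      rw [hget] at heq
      injection heq with hce
      subst hce
      by_cases hc : c ≠ '*'
      · rw [if_pos hc, if_pos hc]
        cases hoc : PySem.Int.ofChars? [c] with
        | none => rfl
        | some d => exact ih (i+1) (num*10+d) (by omega) (by omega) (by omega)
      · rw [if_neg hc, if_neg hc]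
        refine PySem.List.foldl_congr_mem _ _ _ _ ?_
        intro res d _
        by_cases hres : res ≠ -1
        · rw [if_pos hres, if_pos hres]
        · rw [if_neg hres, if_neg hres]
          exact ih (i+1) (num*10+d) (by omega) (by omega) (by omega)

lemma foldl_stay (F : Int → Int) {a : Int} (ds : List Int) (ha : a ≠ -1) :
    ds.foldl (fun res d => if res ≠ -1 then res else F d) a = a := by
  induction ds with
  | nil => rfl
  | cons d ds ih => rw [List.foldl_cons, if_pos ha]; exact ih

-- foldl with early exit = first prime of the concatenation
lemma foldl_first (F : Int → Int) (H : Int → List Int)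
    (hFH : ∀ d, F d = firstP (H d)) :
    ∀ ds : List Int,
      ds.foldl (fun res d => if res ≠ -1 then res else F d) (-1)
        = firstP (ds.flatMap H) := by
  intro ds
  induction ds with
  | nil => rfl
  | cons d ds ih =>
    rw [List.foldl_cons]
    have hstep : (if (-1:Int) ≠ -1 then (-1:Int) else F d) = F d := by simp
    rw [hstep, List.flatMap_cons]
    by_cases hF : F d = -1
    · have hnone : (H d).find? pchk = none := by
        cases hfind : (H d).find? pchk with
        | none => rfl
        | some x =>
          have hx : pchk x = true := List.find?_some hfind
          have hfx : F d = x := by rw [hFH d]; unfold firstP; rw [hfind]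
          have h2x := pchk_ge_two hx
          omega
      rw [hF]
      unfold firstP
      rw [List.find?_append, hnone]
      have ihh := ih
      unfold firstP at ihh
      simpa using ihh
    · have hsome : (H d).find? pchk = some (F d) := by
        cases hfind : (H d).find? pchk with
        | none =>
          have : F d = -1 := by rw [hFH d]; unfold firstP; rw [hfind]
          exact absurd this hF
        | some x =>
          have : F d = x := by rw [hFH d]; unfold firstP; rw [hfind]
          rw [this]
      rw [foldl_stay _ _ hF]
      unfold firstP
      rw [List.find?_append, hsome]
      simp

-- Stage 2: the list-level recursion returns the first prime candidate
lemma dfsL_eq_firstP : ∀ (cs : List Char) (num : Int),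
    (∀ c ∈ cs, c ≠ '*' → (PySem.Int.ofChars? [c]).isSome) →
    dfsL num cs = firstP (cand num cs) := by
  intro cs
  induction cs with
  | nil =>
    intro num _
    rw [dfsL, cand]
    unfold firstP
    by_cases h : pchk num = true
    · rw [if_pos h, List.find?_cons_of_pos h]
    · rw [if_neg h, List.find?_cons_of_neg (by simp [h]), List.find?_nil]
  | cons c rest ih =>
    intro num hgood
    rw [dfsL, cand]
    by_cases hc : c ≠ '*'
    · rw [if_pos hc, if_pos hc]
      have hs : (PySem.Int.ofChars? [c]).isSome := hgood c (by simp) hc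
      cases hoc : PySem.Int.ofChars? [c] with
      | none => rw [hoc] at hs; simp at hs
      | some d =>
        exact ih (num*10+d) (fun c' hc' => hgood c' (List.mem_cons_of_mem _ hc'))
    · rw [if_neg hc, if_neg hc]
      exact foldl_first _ _
        (fun d => ih (num*10+d) (fun c' hc' => hgood c' (List.mem_cons_of_mem _ hc'))) _

-- counter invariance: digits below exponent j ignore multiples of 10^j
lemma buildCand_addmul : ∀ (cs : List Char) (x : Int) (k : Nat) (d r : Int),
    cs.count '*' ≤ k →
    buildCand x k (d * (10:Int)^k + r) cs = buildCand x k r cs := by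
  intro cs
  induction cs with
  | nil => intro x k d r _; rfl
  | cons c rest ih =>
    intro x k d r hk
    by_cases hc : c ≠ '*'
    · rw [buildCand, buildCand, if_pos hc, if_pos hc]
      exact ih _ k d r (by simpa [List.count_cons, hc] using hk)
    · have hk1 : 1 ≤ k := by
        have : rest.count '*' + 1 ≤ k := by
          simpa [List.count_cons, show c = '*' by simpa using hc] using hk
        omega
      rw [buildCand, buildCand, if_neg hc, if_neg hc]
      have hpow : (0:Int) < (10:Int)^(k-1) := by positivity
      have hdig : PySem.Int.mod (PySem.Int.floordiv (d * (10:Int)^k + r) ((10:Int)^(k-1))) 10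
          = PySem.Int.mod (PySem.Int.floordiv r ((10:Int)^(k-1))) 10 := by
        rw [PySem.Int.floordiv_eq_ediv_of_pos hpow, PySem.Int.floordiv_eq_ediv_of_pos hpow,
          PySem.Int.mod_eq_emod_of_pos (by norm_num : (0:Int) < 10),
          PySem.Int.mod_eq_emod_of_pos (by norm_num : (0:Int) < 10)]
        have hsplit : d * (10:Int)^k + r = r + (d * 10) * (10:Int)^(k-1) := by
          conv_lhs => rw [show k = (k-1) + 1 by omega]
          rw [pow_succ]
          ring
        rw [hsplit, Int.add_mul_ediv_right _ _ (by omega : ((10:Int)^(k-1)) ≠ 0)]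
        omega
      rw [hdig]
      have hsplit2 : d * (10:Int)^k + r = (d * 10) * (10:Int)^(k-1) + r := by
        conv_lhs => rw [show k = (k-1) + 1 by omega]
        rw [pow_succ]
        ring
      rw [hsplit2]
      exact ih _ (k-1) (d*10) r (by
        have : rest.count '*' + 1 ≤ k := by
          simpa [List.count_cons, show c = '*' by simpa using hc] using hk
        omega)

-- decomposing a decimal counter range one leading digit at a time
lemma pyRange_decomp (k : Nat) :
    PySem.List.pyRange 0 ((10:Int)^(k+1)) 1
      = (PySem.List.pyRange 0 10 1).flatMap
          (fun d => (PySem.List.pyRange 0 ((10:Int)^k) 1).map (fun r => d * (10:Int)^k + r)) := by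
  have chunk : ∀ (j : Nat),
      PySem.List.pyRange 0 ((j:Int) * (10:Int)^k) 1
        = (PySem.List.pyRange 0 (j:Int) 1).flatMap
            (fun d => (PySem.List.pyRange 0 ((10:Int)^k) 1).map (fun r => d * (10:Int)^k + r)) := by
    intro j
    induction j with
    | zero => simp [PySem.List.pyRange_one_eq_nil]
    | succ j ih =>
      have hpow : (0:Int) < (10:Int)^k := by positivity
      have h1 : (0:Int) ≤ (j:Int) * (10:Int)^k := by positivity
      have h2 : (j:Int) * (10:Int)^k ≤ ((j:Int)+1) * (10:Int)^k := by nlinarith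
      rw [show (((j+1 : Nat)):Int) = (j:Int) + 1 by push_cast; ring]
      rw [show ((j:Int)+1) * (10:Int)^k = (j:Int) * (10:Int)^k + (10:Int)^k by ring] at h2 ⊢
      rw [PySem.List.pyRange_one_append 0 ((j:Int) * (10:Int)^k) _ h1 (by omega), ih,
        PySem.List.pyRange_one_succ_right (by omega : (0:Int) ≤ (j:Int)), List.flatMap_append]
      congr 1
      rw [List.flatMap_singleton]
      rw [PySem.List.pyRange_one, PySem.List.pyRange_one]
      rw [show ((j:Int) * (10:Int)^k + (10:Int)^k - (j:Int) * (10:Int)^k) = (10:Int)^k by ring]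
      rw [show ((10:Int)^k - 0) = (10:Int)^k by ring]
      rw [List.map_map]
      refine List.map_congr_left ?_
      intro a _
      simp
      try ring
  have := chunk 10
  rw [show (((10:Nat)):Int) * (10:Int)^k = (10:Int)^(k+1) by push_cast; ring] at this
  simpa using this

-- Stage 3: B's counter enumeration produces exactly the DFS-ordered candidates
lemma map_buildCand : ∀ (cs : List Char) (x : Int),
    (PySem.List.pyRange 0 ((10:Int)^(cs.count '*')) 1).map
        (fun t => buildCand x (cs.count '*') t cs)
      = cand x cs := by
  intro cs
  induction cs with
  | nil =>
    intro x
    rw [cand]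
    rw [show (PySem.List.pyRange 0 ((10:Int)^(List.count '*' ([]:List Char))) 1) = [0] by decide]
    rfl
  | cons c rest ih =>
    intro x
    by_cases hc : c ≠ '*'
    · have hcnt : (c :: rest).count '*' = rest.count '*' := by
        simp [hc]
      rw [cand, if_pos hc]
      rw [hcnt]
      rw [← ih]
      refine List.map_congr_left ?_
      intro t _
      rw [buildCand, if_pos hc]
    · have hceq : c = '*' := by simpa using hc
      have hcnt : (c :: rest).count '*' = rest.count '*' + 1 := by
        simp [hceq]
      rw [cand, if_neg hc, hcnt, pyRange_decomp]
      rw [List.map_flatMap]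
      refine List.flatMap_congr ?_
      intro d hd
      rw [← ih, List.map_map]
      refine List.map_congr_left ?_
      intro r hr
      have hrmem := (PySem.List.mem_pyRange_one).1 hr
      simp only [Function.comp]
      rw [buildCand, if_neg hc]
      have hj : rest.count '*' + 1 - 1 = rest.count '*' := by omega
      rw [hj]
      have hdig : PySem.Int.mod (PySem.Int.floordiv (d * (10:Int)^(rest.count '*') + r) ((10:Int)^(rest.count '*'))) 10 = d := by
        have hpow : (0:Int) < (10:Int)^(rest.count '*') := by positivity
        rw [PySem.Int.floordiv_eq_ediv_of_pos hpow,
          PySem.Int.mod_eq_emod_of_pos (by norm_num : (0:Int) < 10)]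
        have hdmem := (PySem.List.mem_pyRange_one).1 hd
        rw [show d * (10:Int)^(rest.count '*') + r = r + d * (10:Int)^(rest.count '*') by ring,
          Int.add_mul_ediv_right _ _ (by omega : ((10:Int)^(rest.count '*')) ≠ 0)]
        rw [Int.ediv_eq_zero_of_lt (by omega) (by omega), zero_add]
        exact Int.emod_eq_of_lt (by omega) (by omega)
      rw [hdig]
      exact buildCand_addmul rest _ _ d r (le_refl _)

lemma firstP_map (F : Int → Int) (l : List Int) :
    firstP (l.map F)
      = match l.find? (fun t => pchk (F t)) with
        | some t => F t
        | none => -1 := by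
  unfold firstP
  rw [List.find?_map]
  cases h : l.find? (fun t => pchk (F t)) with
  | none => rw [show (pchk ∘ F) = (fun t => pchk (F t)) from rfl, h]; rfl
  | some t => rw [show (pchk ∘ F) = (fun t => pchk (F t)) from rfl, h]; rfl

lemma suffix_eq_visChars (s : String) : ∀ (n : Nat) (i : Int), (s.toList.length : Int) - i ≤ (n:Int) →
    -(s.toList.length : Int) ≤ i → i ≤ (s.toList.length : Int) →
    (PySem.List.pyRange i (PySem.Str.len s) 1).map (fun j => (PySem.Str.pyGet? s j).getD ' ')
      = visChars i s := by
  intro n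
  induction n with
  | zero =>
    intro i hb h1 h2
    have hi : i = (s.toList.length : Int) := by omega
    subst hi
    rw [show PySem.Str.len s = (s.toList.length : Int) from rfl,
      PySem.List.pyRange_one_eq_nil (by omega), visChars_len]
    rfl
  | succ n ih =>
    intro i hb h1 h2
    by_cases hi : i = (s.toList.length : Int)
    · subst hi
      rw [show PySem.Str.len s = (s.toList.length : Int) from rfl,
        PySem.List.pyRange_one_eq_nil (by omega), visChars_len]
      rfl
    · have hlt : i < (s.toList.length : Int) := by omega
      obtain ⟨c, hget, hcons⟩ := visChars_cons h1 hlt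
      rw [show PySem.Str.len s = (s.toList.length : Int) from rfl] at ih ⊢
      rw [PySem.List.pyRange_one_cons (by omega), List.map_cons, hget, hcons,
        ih (i+1) (by omega) (by omega) (by omega)]
      rfl

-- ===== VERDICT (by name: the statement is the Claim_ definition above) =====
theorem dfs_spec : Claim_equal_dfs := by
  intro i num s _ hpre
  obtain ⟨h1, h2, h3⟩ := hpre
  unfold Spec_dfs dfs_alt
  have h3' : ∀ c ∈ visChars i s, c ≠ '*' → (48 ≤ c.toNat ∧ c.toNat ≤ 57) := by
    rw [List.all_eq_true] at h3
    intro c hc hne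
    have := h3 c hc
    simp [hne] at this
    exact this
  rw [suffix_eq_visChars s ((s.toList.length : Int) - i).toNat i (by omega) h1 h2]
  rw [dfs_eq_dfsL s ((s.toList.length : Int) - i).toNat i num (by omega) h1 h2]
  rw [dfsL_eq_firstP _ _ (fun c hc hne => digit_isSome c (h3' c hc hne).1 (h3' c hc hne).2)]
  rw [← map_buildCand (visChars i s) num, firstP_map]
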